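-- pv_equiv track=rewrite | github.com/Java4all/jenkins-failure-agent | src/rc_finder.py | _find_related_lines
-- ===== SOURCE A (Python) =====
-- from typing import List, Optional, Tuple, Dict, Any
--
-- def _find_related_lines(
--
--     lines: List[str],
--     identifiers: List[str],
--     error_idx: int
-- ) -> List[Tuple[int, str]]:
--     """Find lines that mention the same identifiers as the error."""
--     related = []
--
--     for i, line in enumerate(lines):
--         if i == error_idx:
--             continue
--
--         for identifier in identifiers:
--             if identifier in line or identifier.lower() in line.lower():
--                 related.append((i, line))
--                 break
--
--     # Sort by distance to error (closest first)
--     related.sort(key=lambda x: abs(x[0] - error_idx))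
--
--     return related[:10]  # Max 10 related lines
-- ===== SOURCE B (Python) =====
-- from typing import List, Tuple
--
--
-- def _find_related_lines(
--     lines: List[str],
--     identifiers: List[str],
--     error_idx: int
-- ) -> List[Tuple[int, str]]:
--     """Find lines that mention the same identifiers as the error.
--
--     Two-pointer outward walk from the error line: indices are visited in
--     increasing distance (lower index first on ties), so results arrive
--     already sorted and we can stop after 10 matches.
--     """
--     def matches(line: str) -> bool:
--         low = line.lower()
--         return any(identifier in line or identifier.lower() in low
--                    for identifier in identifiers)
--
--     n = len(lines)
--     related: List[Tuple[int, str]] = []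
--     lo = min(error_idx - 1, n - 1)   # left stream: lo, lo-1, ..., 0
--     hi = max(error_idx + 1, 0)       # right stream: hi, hi+1, ..., n-1
--     while (lo >= 0 or hi < n) and len(related) < 10:
--         if lo >= 0 and (hi >= n or error_idx - lo <= hi - error_idx):
--             i = lo
--             lo -= 1
--         else:
--             i = hi
--             hi += 1
--         if matches(lines[i]):
--             related.append((i, lines[i]))
--     return related
-- ===== Notes on version B (the rewrite author's own statement) =====
-- stated objective: faster
-- what changed: A scans every line for identifier matches, stable-sorts all matches by distance to the error line and truncates to 10; B walks two pointers outward from the error line so matches arrive already in distance order (lower index first on ties) and stops as soon as 10 matches are found, with no sort.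
import Mathlib
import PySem

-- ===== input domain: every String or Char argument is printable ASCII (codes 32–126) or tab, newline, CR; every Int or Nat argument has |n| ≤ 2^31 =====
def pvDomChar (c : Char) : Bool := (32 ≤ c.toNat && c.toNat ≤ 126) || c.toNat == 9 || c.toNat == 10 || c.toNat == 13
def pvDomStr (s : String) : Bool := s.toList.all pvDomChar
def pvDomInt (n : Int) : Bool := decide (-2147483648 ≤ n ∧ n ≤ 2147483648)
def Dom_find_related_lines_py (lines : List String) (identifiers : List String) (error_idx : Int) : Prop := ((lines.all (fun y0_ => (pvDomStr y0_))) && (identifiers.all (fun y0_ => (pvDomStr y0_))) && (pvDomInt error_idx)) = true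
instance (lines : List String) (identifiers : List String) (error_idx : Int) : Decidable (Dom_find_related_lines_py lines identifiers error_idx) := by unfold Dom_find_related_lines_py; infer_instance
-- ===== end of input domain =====

-- B replaces A's scan-everything-then-stable-sort-then-truncate with a two-pointer
-- outward walk from the error line that emits matches already in distance order and
-- stops after 10 hits (objective: alternative algorithm; return values proved equal).

-- ===== PORT A =====
-- literal port of A: collect every matching line, stable-sort by distance, take 10
def find_related_lines_py (lines : List String) (identifiers : List String) (error_idx : Int) : List (Int × String) :=
  let related := (PySem.List.enumerate lines).foldl
    (fun acc p =>
      if p.1 == error_idx then acc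
      else if identifiers.any (fun identifier =>
             PySem.Str.isIn identifier p.2 ||
             PySem.Str.isIn (PySem.Str.lower identifier) (PySem.Str.lower p.2)) then
        acc ++ [p]
      else acc) []
  PySem.List.slice (PySem.List.sorted related (fun x => |x.1 - error_idx|)) none (some 10)

-- ===== PORT B =====
-- B-side helper: `matches(line)` of Source B
def pvMatchB (identifiers : List String) (line : String) : Bool :=
  let low := PySem.Str.lower line
  identifiers.any (fun identifier =>
    PySem.Str.isIn identifier line || PySem.Str.isIn (PySem.Str.lower identifier) low)

-- B-side helper: the `while` loop of Source B (lo walks down, hi walks up, stop at 10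
-- hits); the Nat argument is fuel bounding the iteration count, only for totality —
-- it is chosen large enough that it never cuts the loop short
def pvLoopB (lines identifiers : List String) (error_idx : Int) :
    Nat → Int → Int → List (Int × String) → List (Int × String)
  | 0, _, _, related => related
  | Nat.succ fuel, lo, hi, related =>
    if (0 ≤ lo ∨ hi < (lines.length : Int)) ∧ related.length < 10 then
      if 0 ≤ lo ∧ ((lines.length : Int) ≤ hi ∨ error_idx - lo ≤ hi - error_idx) then
        pvLoopB lines identifiers error_idx fuel (lo - 1) hi
          (if pvMatchB identifiers (PySem.List.pyGetD lines lo "") then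
            related ++ [(lo, PySem.List.pyGetD lines lo "")] else related)
      else
        pvLoopB lines identifiers error_idx fuel lo (hi + 1)
          (if pvMatchB identifiers (PySem.List.pyGetD lines hi "") then
            related ++ [(hi, PySem.List.pyGetD lines hi "")] else related)
    else related

def find_related_lines_py_alt (lines : List String) (identifiers : List String) (error_idx : Int) : List (Int × String) :=
  pvLoopB lines identifiers error_idx
    ((min (error_idx - 1) ((lines.length : Int) - 1) + 1).toNat +
      ((lines.length : Int) - max (error_idx + 1) 0).toNat)
    (min (error_idx - 1) ((lines.length : Int) - 1)) (max (error_idx + 1) 0) []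

-- ===== PRECONDITION & SPEC =====
def Spec_find_related_lines_py (lines : List String) (identifiers : List String) (error_idx : Int) (out : List (Int × String)) : Prop := out = find_related_lines_py_alt lines identifiers error_idx
instance (lines : List String) (identifiers : List String) (error_idx : Int) (out : List (Int × String)) : Decidable (Spec_find_related_lines_py lines identifiers error_idx out) := by unfold Spec_find_related_lines_py; infer_instance

-- ===== CLAIM (what is proved, stated in full; the proofs are below) =====
def Claim_equal_find_related_lines_py : Prop := ∀ (lines : List String) (identifiers : List String) (error_idx : Int), Dom_find_related_lines_py lines identifiers error_idx → Spec_find_related_lines_py lines identifiers error_idx (find_related_lines_py lines identifiers error_idx)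

-- ===== LEMMAS AND PROOFS =====

-- the "stable-sort order" under A's distance key: strictly smaller distance,
-- or equal distance and smaller line index (= earlier original position)
def pvR (e : Int) (a b : Int × String) : Prop :=
  |a.1 - e| < |b.1 - e| ∨ (|a.1 - e| = |b.1 - e| ∧ a.1 < b.1)

def pvRI (e i j : Int) : Prop := |i - e| < |j - e| ∨ (|i - e| = |j - e| ∧ i < j)

-- the sequence of indices B's loop visits, detached from match-collecting
def pvVisit (n e lo hi : Int) : List Int :=
  if h1 : 0 ≤ lo ∨ hi < n then
    if h2 : 0 ≤ lo ∧ (n ≤ hi ∨ e - lo ≤ hi - e) then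
      lo :: pvVisit n e (lo - 1) hi
    else
      hi :: pvVisit n e lo (hi + 1)
  else []
termination_by ((lo + 1).toNat + (n - hi).toNat)
decreasing_by all_goals omega

-- what B collects at a visited index
def pvFm (lines identifiers : List String) (i : Int) : Option (Int × String) :=
  if pvMatchB identifiers (PySem.List.pyGetD lines i "") then
    some (i, PySem.List.pyGetD lines i "") else none

-- B's loop computes: take 10 of (acc ++ the matches along the visit order),
-- whenever the fuel covers the measure that shrinks at every iteration
lemma pv_loop_eq (lines identifiers : List String) (e : Int) :
    ∀ (fuel : Nat) (lo hi : Int) (acc : List (Int × String)),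
    (lo + 1).toNat + ((lines.length : Int) - hi).toNat ≤ fuel → acc.length ≤ 10 →
    pvLoopB lines identifiers e fuel lo hi acc =
      (acc ++ (pvVisit (lines.length : Int) e lo hi).filterMap (pvFm lines identifiers)).take 10 := by
  intro fuel
  induction fuel with
  | zero =>
    intro lo hi acc hfuel hlen
    rw [pvVisit, dif_neg (by omega)]
    simp [pvLoopB, List.take_of_length_le hlen]
  | succ fuel ih =>
    intro lo hi acc hfuel hlen
    by_cases hg : (0 ≤ lo ∨ hi < (lines.length : Int)) ∧ acc.length < 10
    · rw [pvLoopB, if_pos hg]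
      by_cases h2 : 0 ≤ lo ∧ ((lines.length : Int) ≤ hi ∨ e - lo ≤ hi - e)
      · rw [if_pos h2, pvVisit, dif_pos (Or.inl h2.1), dif_pos h2, List.filterMap_cons]
        by_cases hm : pvMatchB identifiers (PySem.List.pyGetD lines lo "")
        · rw [if_pos hm, ih (lo - 1) hi _ (by omega) (by simp; omega)]
          simp [pvFm, hm, List.append_assoc]
        · rw [if_neg hm, ih (lo - 1) hi _ (by omega) hlen]
          simp [pvFm, hm]
      · rw [if_neg h2, pvVisit, dif_pos hg.1, dif_neg h2, List.filterMap_cons]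
        by_cases hm : pvMatchB identifiers (PySem.List.pyGetD lines hi "")
        · rw [if_pos hm, ih lo (hi + 1) _ (by omega) (by simp; omega)]
          simp [pvFm, hm, List.append_assoc]
        · rw [if_neg hm, ih lo (hi + 1) _ (by omega) hlen]
          simp [pvFm, hm]
    · rw [pvLoopB, if_neg hg]
      by_cases hs : 0 ≤ lo ∨ hi < (lines.length : Int)
      · have h10 : acc.length = 10 := by omega
        rw [List.take_append_of_le_length (by omega), List.take_of_length_le (by omega)]
      · rw [pvVisit, dif_neg hs]
        simp [List.take_of_length_le hlen]

-- bounds for visited indices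
lemma pv_visit_mem (n e : Int) : ∀ lo hi, ∀ j ∈ pvVisit n e lo hi,
    (0 ≤ j ∧ j ≤ lo) ∨ (hi ≤ j ∧ j < n) := by
  intro lo hi
  fun_induction pvVisit n e lo hi with
  | case1 lo hi h1 h2 ih =>
    intro j hj
    rcases List.mem_cons.mp hj with rfl | hj
    · left; omega
    · rcases ih j hj with h | h
      · left; omega
      · right; exact h
  | case2 lo hi h1 h2 ih =>
    intro j hj
    rcases List.mem_cons.mp hj with rfl | hj
    · right; omega
    · rcases ih j hj with h | h
      · left; exact h
      · right; omega
  | case3 lo hi h1 => intro j hj; simp at hj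

-- the visit order lists indices in strictly increasing (distance, index) order
lemma pv_visit_pairwise (n e : Int) : ∀ lo hi, lo < e → e < hi →
    (pvVisit n e lo hi).Pairwise (pvRI e) := by
  intro lo hi
  fun_induction pvVisit n e lo hi with
  | case1 lo hi h1 h2 ih =>
    intro hle hgt
    refine List.pairwise_cons.mpr ⟨?_, ih (by omega) hgt⟩
    intro j hj
    have hm := pv_visit_mem n e (lo - 1) hi j hj
    have ha : |lo - e| = e - lo := by rw [abs_of_nonpos (by omega)]; ring
    unfold pvRI
    rcases hm with ⟨hj0, hjlo⟩ | ⟨hjhi, hjn⟩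
    · have hb : |j - e| = e - j := by rw [abs_of_nonpos (by omega)]; ring
      rw [ha, hb]; omega
    · have hb : |j - e| = j - e := abs_of_nonneg (by omega)
      rw [ha, hb]; omega
  | case2 lo hi h1 h2 ih =>
    intro hle hgt
    refine List.pairwise_cons.mpr ⟨?_, ih hle (by omega)⟩
    intro j hj
    have hm := pv_visit_mem n e lo (hi + 1) j hj
    have ha : |hi - e| = hi - e := abs_of_nonneg (by omega)
    unfold pvRI
    rcases hm with ⟨hj0, hjlo⟩ | ⟨hjhi, hjn⟩
    · have hb : |j - e| = e - j := by rw [abs_of_nonpos (by omega)]; ring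
      rw [ha, hb]; omega
    · have hb : |j - e| = j - e := abs_of_nonneg (by omega)
      rw [ha, hb]; omega
  | case3 lo hi h1 => intro _ _; exact List.Pairwise.nil

-- the visit order is a permutation of the two index ranges around the error line
lemma pv_visit_perm (n e : Int) : ∀ lo hi, lo < e → e < hi → lo < n → 0 ≤ hi →
    (pvVisit n e lo hi).Perm
      (PySem.List.pyRange 0 (lo + 1) ++ PySem.List.pyRange hi n) := by
  intro lo hi
  fun_induction pvVisit n e lo hi with
  | case1 lo hi h1 h2 ih =>
    intro hle hgt hln hh0
    have hr : PySem.List.pyRange 0 (lo + 1) =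
        PySem.List.pyRange 0 lo ++ [lo] := PySem.List.pyRange_one_succ_right (by omega)
    rw [hr, List.append_assoc, List.singleton_append]
    have ihh := ih (by omega) hgt (by omega) hh0
    rw [show lo - 1 + 1 = lo by ring] at ihh
    exact (ihh.cons lo).trans List.perm_middle.symm
  | case2 lo hi h1 h2 ih =>
    intro hle hgt hln hh0
    have hhn : hi < n := by omega
    rw [PySem.List.pyRange_one_cons hhn]
    exact ((ih hle (by omega) hln (by omega)).cons hi).trans List.perm_middle.symm
  | case3 lo hi h1 =>
    intro hle hgt hln hh0
    rw [PySem.List.pyRange_one_eq_nil (by omega), PySem.List.pyRange_one_eq_nil (by omega)]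
    rfl

-- those two ranges are exactly the full range with the error index removed
lemma pv_range_split (n e : Int) (hn : 0 ≤ n) :
    (PySem.List.pyRange 0 n).filter (fun i => !(i == e)) =
      PySem.List.pyRange 0 (min (e - 1) (n - 1) + 1) ++ PySem.List.pyRange (max (e + 1) 0) n := by
  by_cases he : 0 ≤ e ∧ e < n
  · have h1 : min (e - 1) (n - 1) + 1 = e := by omega
    have h2 : max (e + 1) 0 = e + 1 := by omega
    rw [h1, h2]
    rw [PySem.List.pyRange_one_append 0 e n (by omega) (by omega)]
    rw [PySem.List.pyRange_one_cons (show e < n by omega)]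
    rw [List.filter_append]
    congr 1
    · apply List.filter_eq_self.mpr
      intro a ha
      rw [PySem.List.mem_pyRange_one] at ha
      simp; omega
    · rw [List.filter_cons_of_neg (by simp)]
      apply List.filter_eq_self.mpr
      intro a ha
      rw [PySem.List.mem_pyRange_one] at ha
      simp; omega
  · have hfull : (PySem.List.pyRange 0 n).filter (fun i => !(i == e)) =
        PySem.List.pyRange 0 n := by
      apply List.filter_eq_self.mpr
      intro a ha
      rw [PySem.List.mem_pyRange_one] at ha
      simp; omega
    rw [hfull]
    by_cases hneg : e < 0
    · have h1 : min (e - 1) (n - 1) + 1 = e := by omega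
      have h2 : max (e + 1) 0 = 0 := by omega
      have h3 : PySem.List.pyRange 0 e = ([] : List Int) :=
        PySem.List.pyRange_one_eq_nil (by omega)
      rw [h1, h2, h3, List.nil_append]
    · have h1 : min (e - 1) (n - 1) + 1 = n := by omega
      have h2 : max (e + 1) 0 = e + 1 := by omega
      have h3 : PySem.List.pyRange (e + 1) n = ([] : List Int) :=
        PySem.List.pyRange_one_eq_nil (by omega)
      rw [h1, h2, h3, List.append_nil]

-- one insertion step of A's stable insertion sort preserves the stable order,
-- when the inserted element comes after everything already placed
lemma pv_insert_pairwise (e : Int) (x : Int × String) :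
    ∀ acc, acc.Pairwise (pvR e) → (∀ y ∈ acc, y.1 < x.1) →
    (PySem.List.insertBy (fun a b => decide (|a.1 - e| < |b.1 - e|)) x acc).Pairwise (pvR e) := by
  intro acc
  induction acc with
  | nil => intro _ _; simp [PySem.List.insertBy]
  | cons y ys ih =>
    intro h hg
    by_cases hb : |x.1 - e| < |y.1 - e|
    · have hu : PySem.List.insertBy (fun a b => decide (|a.1 - e| < |b.1 - e|)) x (y :: ys) =
          x :: y :: ys := by simp [PySem.List.insertBy, hb]
      rw [hu]
      refine List.pairwise_cons.mpr ⟨?_, h⟩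
      intro z hz
      rcases List.mem_cons.mp hz with rfl | hz
      · exact Or.inl hb
      · have hyz := List.rel_of_pairwise_cons h hz
        unfold pvR at hyz ⊢
        omega
    · have hu : PySem.List.insertBy (fun a b => decide (|a.1 - e| < |b.1 - e|)) x (y :: ys) =
          y :: PySem.List.insertBy (fun a b => decide (|a.1 - e| < |b.1 - e|)) x ys := by
        simp [PySem.List.insertBy, hb]
      rw [hu]
      refine List.pairwise_cons.mpr
        ⟨?_, ih h.of_cons (fun a ha => hg a (List.mem_cons_of_mem _ ha))⟩
      intro z hz
      rcases (PySem.List.mem_insertBy _ _ _ _).mp hz with rfl | hz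
      · have hyx := hg y List.mem_cons_self
        unfold pvR; omega
      · exact List.rel_of_pairwise_cons h hz

-- hence A's stable sort of an index-increasing list is ordered by (distance, index)
lemma pv_sorted_pairwise (e : Int) (xs : List (Int × String))
    (hxs : xs.Pairwise (fun a b => a.1 < b.1)) :
    (PySem.List.sorted xs (fun x => |x.1 - e|)).Pairwise (pvR e) := by
  rw [PySem.List.sorted_eq_foldl_insertBy]
  have main : ∀ (l : List (Int × String)) (acc : List (Int × String)),
      acc.Pairwise (pvR e) → (∀ a ∈ acc, ∀ z ∈ l, a.1 < z.1) →
      l.Pairwise (fun a b => a.1 < b.1) →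
      (l.foldl (fun acc x =>
        PySem.List.insertBy (fun a b => decide (|a.1 - e| < |b.1 - e|)) x acc) acc).Pairwise
        (pvR e) := by
    intro l
    induction l with
    | nil => intro acc h _ _; exact h
    | cons x t ih =>
      intro acc h hsep hl
      simp only [List.foldl_cons]
      apply ih
      · exact pv_insert_pairwise e x acc h
          (fun y hy => hsep y hy x List.mem_cons_self)
      · intro a ha z hz
        rcases (PySem.List.mem_insertBy _ _ _ _).mp ha with rfl | ha
        · exact List.rel_of_pairwise_cons hl hz
        · exact hsep a ha z (List.mem_cons_of_mem _ hz)
      · exact hl.of_cons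
  exact main xs [] List.Pairwise.nil (by simp) hxs

-- a list in strict (distance, index) order is rigid: a permutation of it in the
-- same order is the list itself
lemma pv_unique (e : Int) (l₁ l₂ : List (Int × String))
    (h₁ : l₁.Pairwise (pvR e)) (h₂ : l₂.Pairwise (pvR e)) (hp : l₁.Perm l₂) : l₁ = l₂ := by
  refine List.Perm.eq_of_pairwise ?_ h₁ h₂ hp
  intro a b _ _ hab hba
  have hfalse : False := by unfold pvR at hab hba; omega
  exact hfalse.elim

-- filterMap of an if-some-else-none is map-of-filter
lemma pv_filterMap_if {α β : Type} (c : α → Bool) (g : α → β) (l : List α) :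
    l.filterMap (fun i => if c i then some (g i) else none) = (l.filter c).map g := by
  induction l with
  | nil => rfl
  | cons x t ih => by_cases h : c x <;> simp [h, ih]

-- A's collecting loop is a filter
lemma pv_foldA (e : Int) (P : String → Bool) :
    ∀ (l : List (Int × String)) (acc : List (Int × String)),
    l.foldl (fun acc p => if p.1 == e then acc
      else if P p.2 then acc ++ [p] else acc) acc =
      acc ++ l.filter (fun p => P p.2 && !(p.1 == e)) := by
  intro l
  induction l with
  | nil => intro acc; simp
  | cons x t ih =>
    intro acc
    rw [List.foldl_cons, List.filter_cons]
    by_cases h1 : x.1 == e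
    · have hc : (P x.2 && !(x.1 == e)) = false := by simp [h1]
      rw [if_pos h1, hc]
      simp only [Bool.false_eq_true, if_false]
      exact ih acc
    · by_cases h2 : P x.2
      · have hc : (P x.2 && !(x.1 == e)) = true := by simp [h1, h2]
        rw [if_neg h1, if_pos h2, hc]
        simp only [if_true]
        rw [ih, List.append_assoc, List.singleton_append]
      · have hc : (P x.2 && !(x.1 == e)) = false := by simp [h2]
        rw [if_neg h1, if_neg h2, hc]
        simp only [Bool.false_eq_true, if_false]
        exact ih acc

-- ===== VERDICT (by name: the statement is the Claim_ definition above) =====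
theorem find_related_lines_py_spec : Claim_equal_find_related_lines_py := by
  intro lines identifiers e _
  unfold Spec_find_related_lines_py find_related_lines_py find_related_lines_py_alt
  set n : Int := (lines.length : Int) with hn
  set lo0 : Int := min (e - 1) (n - 1) with hlo0
  set hi0 : Int := max (e + 1) 0 with hhi0
  set g : Int → Int × String := fun i => (i, PySem.List.pyGetD lines i "") with hg
  -- A's collected list, as map-of-filter over the index range
  have hrel : (PySem.List.enumerate lines).foldl
      (fun acc p =>
        if p.1 == e then acc
        else if identifiers.any (fun identifier =>
               PySem.Str.isIn identifier p.2 ||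
               PySem.Str.isIn (PySem.Str.lower identifier) (PySem.Str.lower p.2)) then
          acc ++ [p]
        else acc) [] =
      ((PySem.List.pyRange 0 n).filter
        (fun i => pvMatchB identifiers (PySem.List.pyGetD lines i "") && !(i == e))).map g := by
    have hbody : ∀ (l : List (Int × String)) (acc : List (Int × String)),
        l.foldl (fun acc p =>
          if p.1 == e then acc
          else if identifiers.any (fun identifier =>
                 PySem.Str.isIn identifier p.2 ||
                 PySem.Str.isIn (PySem.Str.lower identifier) (PySem.Str.lower p.2)) then
            acc ++ [p]
          else acc) acc =
        acc ++ l.filter (fun p => pvMatchB identifiers p.2 && !(p.1 == e)) :=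
      pv_foldA e (fun s => pvMatchB identifiers s)
    rw [hbody, List.nil_append, PySem.List.enumerate_eq_map_pyRange lines ""]
    rw [List.filter_map]
    rfl
  rw [hrel]
  -- B's loop, as take-10 of the matches along the visit order
  rw [pv_loop_eq lines identifiers e _ lo0 hi0 [] (le_refl _) (by simp)]
  rw [List.nil_append]
  have hfm : (pvVisit n e lo0 hi0).filterMap (pvFm lines identifiers) =
      ((pvVisit n e lo0 hi0).filter
        (fun i => pvMatchB identifiers (PySem.List.pyGetD lines i ""))).map g :=
    pv_filterMap_if _ _ _
  rw [hfm]
  -- the two underlying lists are permutations in the same strict order, hence equal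
  have hperm : (((pvVisit n e lo0 hi0).filter
        (fun i => pvMatchB identifiers (PySem.List.pyGetD lines i ""))).map g).Perm
      (((PySem.List.pyRange 0 n).filter
        (fun i => pvMatchB identifiers (PySem.List.pyGetD lines i "") && !(i == e))).map g) := by
    apply List.Perm.map
    have hv : (pvVisit n e lo0 hi0).Perm ((PySem.List.pyRange 0 n).filter (fun i => !(i == e))) := by
      refine (pv_visit_perm n e lo0 hi0 (by omega) (by omega) (by omega) (by omega)).trans ?_
      rw [pv_range_split n e (by omega)]
    refine (hv.filter _).trans ?_
    rw [List.filter_filter]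
  have hpair1 : (((pvVisit n e lo0 hi0).filter
      (fun i => pvMatchB identifiers (PySem.List.pyGetD lines i ""))).map g).Pairwise (pvR e) := by
    rw [List.pairwise_map]
    apply List.Pairwise.sublist (List.filter_sublist)
    have := pv_visit_pairwise n e lo0 hi0 (by omega) (by omega)
    exact this.imp (fun h => h)
  have hpairidx : (((PySem.List.pyRange 0 n).filter
      (fun i => pvMatchB identifiers (PySem.List.pyGetD lines i "") && !(i == e))).map g).Pairwise
      (fun a b => a.1 < b.1) := by
    rw [List.pairwise_map]
    apply List.Pairwise.sublist (List.filter_sublist)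
    exact PySem.List.pairwise_lt_pyRange_one 0 n
  have hsorted := pv_sorted_pairwise e _ hpairidx
  have heq : PySem.List.sorted
      (((PySem.List.pyRange 0 n).filter
        (fun i => pvMatchB identifiers (PySem.List.pyGetD lines i "") && !(i == e))).map g)
      (fun x => |x.1 - e|) =
      ((pvVisit n e lo0 hi0).filter
        (fun i => pvMatchB identifiers (PySem.List.pyGetD lines i ""))).map g := by
    apply pv_unique e _ _ hsorted hpair1
    exact (PySem.List.sorted_perm _ _ _).trans hperm.symm
  rw [PySem.List.slice_to _ (by omega), heq]
  rfl
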